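-- pv_equiv track=rewrite | github.com/JunHyeongKim73/problem-solving-python | BOJ/이분탐색/두 배열의 합.py | possible_list
-- ===== SOURCE A (Python) =====
-- def possible_list(l):
--     p_l = []
--     for step in range(1, len(l) + 1):
--         sums = 0
--         for i in range(step):
--             sums += l[i]
--
--         p_l.append(sums)
--         start_idx, end_idx = 0, step
--         while end_idx < len(l):
--             sums -= l[start_idx]
--             sums += l[end_idx]
--             p_l.append(sums)
--             start_idx += 1
--             end_idx += 1
--
--     return p_l
-- ===== SOURCE B (Python) =====
-- from itertools import accumulate
--
-- def possible_list(l):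
--     P = list(accumulate(l, initial=0))
--     return [P[start + step] - P[start]
--             for step in range(1, len(l) + 1)
--             for start in range(len(l) - step + 1)]
-- ===== Notes on version B (the rewrite author's own statement) =====
-- stated objective: simpler
-- what changed: Replaces the per-length sliding-window running sum (inner summation loop plus a while loop maintaining start/end indices) by a prefix-sum table built once, each window sum read off as a difference of two prefix sums in a single comprehension.
import Mathlib
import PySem

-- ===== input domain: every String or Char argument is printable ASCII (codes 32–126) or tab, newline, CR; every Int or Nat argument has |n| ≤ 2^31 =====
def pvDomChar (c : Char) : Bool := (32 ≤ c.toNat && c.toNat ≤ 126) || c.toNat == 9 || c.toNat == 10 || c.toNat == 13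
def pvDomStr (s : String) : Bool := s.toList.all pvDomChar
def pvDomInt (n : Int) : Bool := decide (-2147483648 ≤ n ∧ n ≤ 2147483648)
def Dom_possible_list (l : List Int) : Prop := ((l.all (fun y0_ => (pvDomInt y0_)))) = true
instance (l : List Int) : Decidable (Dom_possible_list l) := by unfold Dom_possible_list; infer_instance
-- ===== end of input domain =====

-- B replaces A's per-length sliding-window running sum by a prefix-sum table,
-- reading each window sum as a difference of two prefix sums (objective: simpler).

-- ===== PORT A =====
-- 'sums = 0; for i in range(step): sums += l[i]'  (i < step ≤ len l, so getD is exact)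
def sumFirst (l : List Int) (step : Nat) : Int :=
  (List.range step).foldl (fun s i => s + l.getD i 0) 0

-- the 'while end_idx < len(l)' loop; start_idx/end_idx stay in range, so getD is exact
def slide (l : List Int) (sums : Int) (startIdx endIdx : Nat) (acc : List Int) : List Int :=
  if endIdx < l.length then
    slide l (sums - l.getD startIdx 0 + l.getD endIdx 0) (startIdx + 1) (endIdx + 1)
      (acc ++ [sums - l.getD startIdx 0 + l.getD endIdx 0])
  else acc
termination_by l.length - endIdx

-- 'for step in range(1, len(l)+1)' with step = step0 + 1
def possible_list (l : List Int) : List Int :=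
  (List.range l.length).foldl (fun p_l step0 =>
    let sums := sumFirst l (step0 + 1)
    slide l sums 0 (step0 + 1) (p_l ++ [sums])) []

-- ===== PORT B =====
-- P = list(accumulate(l, initial=0)) is List.scanl (·+·) 0; all indices are in range, getD is exact
def possible_list_alt (l : List Int) : List Int :=
  let P := l.scanl (· + ·) 0
  (List.range l.length).flatMap (fun step0 =>
    (List.range (l.length - step0)).map (fun start =>
      P.getD (start + (step0 + 1)) 0 - P.getD start 0))

-- ===== PRECONDITION & SPEC =====
def Spec_possible_list (l : List Int) (out : List Int) : Prop := out = possible_list_alt l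
instance (l : List Int) (out : List Int) : Decidable (Spec_possible_list l out) := by unfold Spec_possible_list; infer_instance

-- ===== CLAIM (what is proved, stated in full; the proofs are below) =====
def Claim_equal_possible_list : Prop := ∀ (l : List Int), Dom_possible_list l → Spec_possible_list l (possible_list l)

-- ===== LEMMAS AND PROOFS =====

theorem sub_take_congr (l : List Int) {a b c d : Nat} (h1 : a = c) (h2 : b = d) :
    (l.take a).sum - (l.take b).sum = (l.take c).sum - (l.take d).sum := by rw [h1, h2]

theorem take_succ_sum (l : List Int) (k : Nat) (hk : k < l.length) :
    (l.take (k + 1)).sum = (l.take k).sum + l.getD k 0 := by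
  rw [List.sum_take_succ _ _ hk]
  simp [List.getD_eq_getElem?_getD, List.getElem?_eq_getElem hk]

theorem scanl_getD (l : List Int) (a : Int) (i : Nat) (hi : i ≤ l.length) :
    (l.scanl (· + ·) a).getD i 0 = a + (l.take i).sum := by
  induction l generalizing a i with
  | nil =>
    simp only [List.length_nil, Nat.le_zero] at hi
    subst hi; simp [List.scanl]
  | cons x t ih =>
    cases i with
    | zero => simp [List.scanl]
    | succ j =>
      rw [List.scanl_cons]
      simp only [List.getD_cons_succ, List.take_succ_cons, List.sum_cons]
      rw [ih (a + x) j (by simpa using hi)]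
      ring

theorem sumFirst_eq (l : List Int) (step : Nat) (h : step ≤ l.length) :
    sumFirst l step = (l.take step).sum := by
  induction step with
  | zero => simp [sumFirst]
  | succ k ih =>
    have hk : k < l.length := h
    rw [take_succ_sum l k hk, ← ih (Nat.le_of_lt hk)]
    simp [sumFirst, List.range_succ]

theorem slide_spec (l : List Int) : ∀ (k startIdx endIdx : Nat) (acc : List Int),
    l.length - endIdx = k → startIdx < endIdx → endIdx ≤ l.length →
    slide l ((l.take endIdx).sum - (l.take startIdx).sum) startIdx endIdx acc
      = acc ++ (List.range k).map
          (fun j => (l.take (endIdx + j + 1)).sum - (l.take (startIdx + j + 1)).sum) := by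
  intro k
  induction k with
  | zero =>
    intro startIdx endIdx acc hk _ hle
    rw [slide]
    have : ¬ endIdx < l.length := by omega
    simp [this]
  | succ k ih =>
    intro startIdx endIdx acc hk hst hle
    have hend : endIdx < l.length := by omega
    have hstl : startIdx < l.length := by omega
    rw [slide]
    simp only [if_pos hend]
    have hv : (l.take endIdx).sum - (l.take startIdx).sum - l.getD startIdx 0 + l.getD endIdx 0
        = (l.take (endIdx + 1)).sum - (l.take (startIdx + 1)).sum := by
      rw [take_succ_sum l endIdx hend, take_succ_sum l startIdx hstl]; ring
    rw [hv, ih (startIdx + 1) (endIdx + 1) _ (by omega) (by omega) (by omega)]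
    simp only [List.range_succ_eq_map, List.map_cons, List.map_map, List.append_assoc,
      List.singleton_append]
    congr 1
    refine List.cons_eq_cons.mpr ⟨?_, ?_⟩
    · exact sub_take_congr l (by omega) (by omega)
    · apply List.map_congr_left
      intro j _
      simp only [Function.comp_apply]
      exact sub_take_congr l (by omega) (by omega)

theorem flatMap_congr_mem {α β : Type} (S : List α) (f g : α → List β)
    (h : ∀ s ∈ S, f s = g s) : S.flatMap f = S.flatMap g := by
  simp only [List.flatMap_def]
  rw [List.map_congr_left h]

-- one iteration of A's outer loop, expressed via prefix sums
theorem stepA (l : List Int) (step0 : Nat) (h : step0 < l.length) (p_l : List Int) :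
    (let sums := sumFirst l (step0 + 1)
     slide l sums 0 (step0 + 1) (p_l ++ [sums]))
      = p_l ++ (List.range (l.length - step0)).map
          (fun start => (l.take (start + (step0 + 1))).sum - (l.take start).sum) := by
  simp only
  rw [sumFirst_eq l (step0 + 1) (by omega)]
  have h0 : (l.take (step0 + 1)).sum = (l.take (step0 + 1)).sum - (l.take 0).sum := by simp
  conv_lhs => rw [h0]
  rw [slide_spec l (l.length - (step0 + 1)) 0 (step0 + 1) _ rfl (by omega) (by omega)]
  have hr : l.length - step0 = (l.length - (step0 + 1)) + 1 := by omega
  rw [hr]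
  simp only [List.range_succ_eq_map, List.map_cons, List.map_map, List.append_assoc,
    List.singleton_append]
  congr 1
  refine List.cons_eq_cons.mpr ⟨?_, ?_⟩
  · exact sub_take_congr l (by omega) (by omega)
  · apply List.map_congr_left
    intro j _
    simp only [Function.comp_apply]
    exact sub_take_congr l (by omega) (by omega)

theorem foldA (l : List Int) : ∀ (S : List Nat), (∀ s ∈ S, s < l.length) → ∀ (p_l : List Int),
    S.foldl (fun p_l step0 =>
        let sums := sumFirst l (step0 + 1)
        slide l sums 0 (step0 + 1) (p_l ++ [sums])) p_l
      = p_l ++ S.flatMap (fun step0 => (List.range (l.length - step0)).map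
          (fun start => (l.take (start + (step0 + 1))).sum - (l.take start).sum)) := by
  intro S
  induction S with
  | nil => intro _ p_l; simp
  | cons s S ih =>
    intro hmem p_l
    simp only [List.foldl_cons, List.flatMap_cons]
    rw [stepA l s (hmem s (by simp)) p_l, ih (fun t ht => hmem t (by simp [ht])),
      List.append_assoc]

-- ===== VERDICT (by name: the statement is the Claim_ definition above) =====
theorem possible_list_spec : Claim_equal_possible_list := by
  intro l _
  unfold Spec_possible_list possible_list possible_list_alt
  rw [foldA l (List.range l.length) (fun s hs => List.mem_range.mp hs) []]
  simp only [List.nil_append]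
  apply flatMap_congr_mem
  intro step0 hs
  have hstep : step0 < l.length := List.mem_range.mp hs
  apply List.map_congr_left
  intro start hstart
  have hst : start < l.length - step0 := List.mem_range.mp hstart
  rw [scanl_getD l 0 (start + (step0 + 1)) (by omega), scanl_getD l 0 start (by omega)]
  ring
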